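-- pv_equiv track=rewrite | github.com/cousinhuey/hueybot | basics.py | rating_names
-- ===== SOURCE A (Python) =====
-- def rating_names(text):
--     text = str.lower(text)
--     ratingTerms = {
--         "hgt": ["height", "tall", "size", "stature"],
--         "stre": ["strength", "muscle", "toughness", "fat", "big"],
--         "spd": ["speed", "quick", "velocity", "agility"],
--         "jmp": ["jump", "vertical", "leap", "bounce"],
--         "endu": ["endurance", "stamina", "cardio", "resilience"],
--         "ins": ["inside", "post", "interior", "paint"],
--         "dnk": ["dunks", "layups", "slashing", "finishing"],
--         "ft": ["freethrow", "foulshot", "free"],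
--         "fg": ["midrange", "2pt", "two"],
--         "tp": ["threepoint", "outside", "range", "3pt"],
--         "oiq": ["offensiveiq", "offense"],
--         "diq": ["defensiveiq", "defense"],
--         "drb": ["dribbling", "handling", "control"],
--         "pss": ["passing", "playmaking", "assist"],
--         "reb": ["rebounding", "boards", "boxout"],
--     }
--     for r, t in ratingTerms.items():
--         if text in t:
--             return r
--     return text
-- ===== SOURCE B (Python) =====
-- # Rating table serialized as one compact text block: each line is
-- # "<abbrev> <term> <term> ...". Parsed once at import into an inverted
-- # term -> abbrev index; each call is then a single dict lookup.
-- _TABLE = """hgt height tall size stature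
-- stre strength muscle toughness fat big
-- spd speed quick velocity agility
-- jmp jump vertical leap bounce
-- endu endurance stamina cardio resilience
-- ins inside post interior paint
-- dnk dunks layups slashing finishing
-- ft freethrow foulshot free
-- fg midrange 2pt two
-- tp threepoint outside range 3pt
-- oiq offensiveiq offense
-- diq defensiveiq defense
-- drb dribbling handling control
-- pss passing playmaking assist
-- reb rebounding boards boxout"""
--
-- _LOOKUP = {}
-- for _line in _TABLE.splitlines():
--     _words = _line.split()
--     for _term in _words[1:]:
--         _LOOKUP[_term] = _words[0]
--
-- def rating_names(text):
--     t = str.lower(text)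
--     return _LOOKUP.get(t, t)
-- ===== Notes on version B (the rewrite author's own statement) =====
-- stated objective: alternative
-- what changed: The nested dict-of-term-lists and per-call scan with list membership are replaced by a compact text table parsed once at import into an inverted term-to-abbreviation dictionary; each call is then a single lookup with the lowered text as default.
import Mathlib
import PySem

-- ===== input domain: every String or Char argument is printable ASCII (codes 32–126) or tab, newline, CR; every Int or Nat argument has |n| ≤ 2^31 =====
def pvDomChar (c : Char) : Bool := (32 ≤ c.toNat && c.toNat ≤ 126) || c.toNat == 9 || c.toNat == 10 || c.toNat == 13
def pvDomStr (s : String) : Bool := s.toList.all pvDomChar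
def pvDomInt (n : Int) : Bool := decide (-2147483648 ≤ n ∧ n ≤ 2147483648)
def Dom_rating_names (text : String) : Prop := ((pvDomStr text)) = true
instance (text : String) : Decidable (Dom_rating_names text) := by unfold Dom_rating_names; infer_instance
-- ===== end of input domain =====

-- B replaces A's nested dict-of-term-lists and per-call scan by a compact text table parsed
-- once into an inverted term→abbreviation dictionary; each call is a single defaulted lookup.

-- ===== PORT A =====
def ratingTermsA : List (String × List String) := [
  ("hgt", ["height", "tall", "size", "stature"]),
  ("stre", ["strength", "muscle", "toughness", "fat", "big"]),
  ("spd", ["speed", "quick", "velocity", "agility"]),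
  ("jmp", ["jump", "vertical", "leap", "bounce"]),
  ("endu", ["endurance", "stamina", "cardio", "resilience"]),
  ("ins", ["inside", "post", "interior", "paint"]),
  ("dnk", ["dunks", "layups", "slashing", "finishing"]),
  ("ft", ["freethrow", "foulshot", "free"]),
  ("fg", ["midrange", "2pt", "two"]),
  ("tp", ["threepoint", "outside", "range", "3pt"]),
  ("oiq", ["offensiveiq", "offense"]),
  ("diq", ["defensiveiq", "defense"]),
  ("drb", ["dribbling", "handling", "control"]),
  ("pss", ["passing", "playmaking", "assist"]),
  ("reb", ["rebounding", "boards", "boxout"])]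

-- the 'for r, t in ratingTerms.items(): if text in t: return r' loop
def ratingScan (s : String) : List (String × List String) → String
  | [] => s
  | (r, t) :: rest => if t.contains s then r else ratingScan s rest

def rating_names (text : String) : String :=
  ratingScan (PySem.Str.lower text) ratingTermsA

-- ===== PORT B =====
-- the serialized table _TABLE
def ratingTable : String := "hgt height tall size stature\nstre strength muscle toughness fat big\nspd speed quick velocity agility\njmp jump vertical leap bounce\nendu endurance stamina cardio resilience\nins inside post interior paint\ndnk dunks layups slashing finishing\nft freethrow foulshot free\nfg midrange 2pt two\ntp threepoint outside range 3pt\noiq offensiveiq offense\ndiq defensiveiq defense\ndrb dribbling handling control\npss passing playmaking assist\nreb rebounding boards boxout"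

-- the parse loop: for line in _TABLE.splitlines(): words = line.split(); for term in words[1:]: lookup[term] = words[0]
def ratingLookup : PySem.Dict String String :=
  (PySem.Str.splitlines ratingTable).foldl (fun d line =>
    match PySem.Str.split₀ line with
    | [] => d
    | r :: terms => terms.foldl (fun d t => d.insert t r) d) PySem.Dict.empty

def rating_names_alt (text : String) : String :=
  let t := PySem.Str.lower text
  ratingLookup.getD t t

-- ===== PRECONDITION & SPEC =====
def Spec_rating_names (text : String) (out : String) : Prop := out = rating_names_alt text
instance (text : String) (out : String) : Decidable (Spec_rating_names text out) := by unfold Spec_rating_names; infer_instance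

-- ===== CLAIM (what is proved, stated in full; the proofs are below) =====
def Claim_equal_rating_names : Prop := ∀ (text : String), Dom_rating_names text → Spec_rating_names text (rating_names text)

-- ===== LEMMAS AND PROOFS =====
lemma if_or {α : Type} (a b : Bool) (x y : α) :
    (if (a || b) then x else y) = if a then x else if b then x else y := by
  cases a <;> cases b <;> simp

set_option maxRecDepth 16000 in
set_option maxHeartbeats 2000000 in
lemma lookup_items : ratingLookup = PySem.Dict.mk [
  ("height", "hgt"),
  ("tall", "hgt"),
  ("size", "hgt"),
  ("stature", "hgt"),
  ("strength", "stre"),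
  ("muscle", "stre"),
  ("toughness", "stre"),
  ("fat", "stre"),
  ("big", "stre"),
  ("speed", "spd"),
  ("quick", "spd"),
  ("velocity", "spd"),
  ("agility", "spd"),
  ("jump", "jmp"),
  ("vertical", "jmp"),
  ("leap", "jmp"),
  ("bounce", "jmp"),
  ("endurance", "endu"),
  ("stamina", "endu"),
  ("cardio", "endu"),
  ("resilience", "endu"),
  ("inside", "ins"),
  ("post", "ins"),
  ("interior", "ins"),
  ("paint", "ins"),
  ("dunks", "dnk"),
  ("layups", "dnk"),
  ("slashing", "dnk"),
  ("finishing", "dnk"),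
  ("freethrow", "ft"),
  ("foulshot", "ft"),
  ("free", "ft"),
  ("midrange", "fg"),
  ("2pt", "fg"),
  ("two", "fg"),
  ("threepoint", "tp"),
  ("outside", "tp"),
  ("range", "tp"),
  ("3pt", "tp"),
  ("offensiveiq", "oiq"),
  ("offense", "oiq"),
  ("defensiveiq", "diq"),
  ("defense", "diq"),
  ("dribbling", "drb"),
  ("handling", "drb"),
  ("control", "drb"),
  ("passing", "pss"),
  ("playmaking", "pss"),
  ("assist", "pss"),
  ("rebounding", "reb"),
  ("boards", "reb"),
  ("boxout", "reb")] := by decide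

lemma getD_mk_nil {ν : Type} (x : String) (d : ν) : (PySem.Dict.mk ([] : List (String × ν))).getD x d = d := rfl

lemma getD_mk_cons {ν : Type} (k : String) (v : ν) (rest : List (String × ν)) (x : String) (d : ν) :
    (PySem.Dict.mk ((k, v) :: rest)).getD x d = if x == k then v else (PySem.Dict.mk rest).getD x d := by
  have hc : (k == x) = (x == k) := by
    by_cases h : x = k
    · simp [h]
    · simp [h, Ne.symm h]
  rw [PySem.Dict.getD_eq_get?_getD, PySem.Dict.get?_mk_cons, hc]
  cases h : (x == k) <;> simp [PySem.Dict.getD_eq_get?_getD]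

set_option maxRecDepth 8000 in
set_option maxHeartbeats 1000000 in
lemma scan_eq_lookup (s : String) : ratingScan s ratingTermsA = ratingLookup.getD s s := by
  rw [lookup_items]
  simp only [ratingTermsA, ratingScan, List.contains_cons, List.contains_nil, Bool.or_false,
    if_or, getD_mk_cons, getD_mk_nil]

-- ===== VERDICT (by name: the statement is the Claim_ definition above) =====
theorem rating_names_spec : Claim_equal_rating_names := by
  intro text _
  unfold Spec_rating_names rating_names rating_names_alt
  exact scan_eq_lookup (PySem.Str.lower text)
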